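-- pv_equiv track=rewrite | github.com/pypi-data/pypi-mirror-401 | packages/verkkofillet/verkkofillet-0.1.20-py3-none-any.whl/verkkofillet/preprocessing/_patching_from_other_asm.py | cigar_counts_and_ends
-- ===== SOURCE A (Python) =====
-- from typing import List, Tuple, Optional
--
-- def parse_len_op_cigar(cigar: str, assume_final_equals: bool = True) -> List[Tuple[str, int]]:
--     """Parse len-op CIGAR like '100=2D50X3I20=' -> [('=',100),('D',2),('X',50),('I',3),('=',20)]."""
--     out, num = [], []
--     for ch in cigar:
--         if ch.isdigit():
--             num.append(ch)
--         else:
--             if not num: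
--                 raise ValueError(f"Bad CIGAR near '{ch}' in '{cigar[:80]}...'")
--             out.append((ch, int("".join(num))))
--             num = []
--     if num:
--         if assume_final_equals:
--             out.append(("=", int("".join(num))))
--         else:
--             raise ValueError("Trailing number without op in CIGAR.")
--     return out
--
-- def cigar_counts_and_ends(cigar: str, qstart: int, tstart: int):
--     """
--     Return:
--       qend, tend, nmatch, alnlen, XI, XD, NM
--     where (PAF spec):
--       nmatch = exact matches only ( '=' )
--       alnlen = matches + mismatches + gaps  (= + X + M + I + D)
--       NM     = mismatches + gaps            ( X + I + D )
--     """
--     ops = parse_len_op_cigar(cigar, assume_final_equals=True)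
--     q = qstart; t = tstart
--     n_eq = n_x = n_m = n_I = n_D = 0
--     for op, n in ops:
--         if op in ("=", "X", "M"):
--             q += n; t += n
--             if op == "=": n_eq += n
--             elif op == "X": n_x += n
--             else: n_m += n
--         elif op == "I":
--             q += n; n_I += n
--         elif op == "D":
--             t += n; n_D += n
--         else:
--             # ignore S/H/P etc. for PAF core stats
--             pass
--     qend = q; tend = t
--     nmatch = n_eq
--     alnlen = n_eq + n_x + n_m + n_I + n_D  # **includes gaps**
--     NM = n_x + n_I + n_D
--     return qend, tend, nmatch, alnlen, n_I, n_D, NM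
-- ===== SOURCE B (Python) =====
-- def cigar_counts_and_ends(cigar: str, qstart: int, tstart: int):
--     # One fused index-based scan: read each digit run by slicing, dispatch on the
--     # following op via a counter dict; no intermediate ops list is built.
--     q, t = qstart, tstart
--     cnt = {'=': 0, 'X': 0, 'M': 0, 'I': 0, 'D': 0}
--     i, L = 0, len(cigar)
--     while i < L:
--         j = i
--         while j < L and cigar[j].isdigit():
--             j += 1
--         if j == i:
--             raise ValueError(f"Bad CIGAR near '{cigar[j]}' in '{cigar[:80]}...'")
--         n = int(cigar[i:j])
--         op = cigar[j] if j < L else '='   # trailing number counts as '='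
--         if op in cnt:
--             if op != 'D':
--                 q += n
--             if op != 'I':
--                 t += n
--             cnt[op] += n
--         i = j + 1
--     nmatch = cnt['=']
--     alnlen = nmatch + cnt['X'] + cnt['M'] + cnt['I'] + cnt['D']
--     NM = cnt['X'] + cnt['I'] + cnt['D']
--     return q, t, nmatch, alnlen, cnt['I'], cnt['D'], NM
-- ===== Notes on version B (the rewrite author's own statement) =====
-- stated objective: alternative
-- what changed: B drops A's two-phase parse-then-accumulate design (building an intermediate list of (op,len) tuples char by char) and instead does one fused index/slice scan that reads each digit run at once and updates a counter dict keyed by op in place; no ops list is ever built.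
import Mathlib
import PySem

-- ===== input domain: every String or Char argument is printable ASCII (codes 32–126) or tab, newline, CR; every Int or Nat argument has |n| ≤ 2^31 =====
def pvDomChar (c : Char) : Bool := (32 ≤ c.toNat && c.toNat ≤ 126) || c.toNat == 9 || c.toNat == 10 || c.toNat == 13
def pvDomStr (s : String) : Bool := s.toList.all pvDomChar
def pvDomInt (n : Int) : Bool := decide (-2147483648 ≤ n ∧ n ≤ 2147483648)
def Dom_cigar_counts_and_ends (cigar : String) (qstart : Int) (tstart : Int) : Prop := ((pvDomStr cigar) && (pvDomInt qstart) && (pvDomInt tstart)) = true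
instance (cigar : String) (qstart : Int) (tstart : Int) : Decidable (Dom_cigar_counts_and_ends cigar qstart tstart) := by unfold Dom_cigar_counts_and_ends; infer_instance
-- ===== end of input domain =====

-- B replaces A's two-phase parse-into-ops-list-then-accumulate by one fused slice scan over
-- digit runs updating a counter dict in place (objective: alternative decomposition, same cost).

-- ===== PORT A =====
-- int("".join(num)) on a nonempty run of ASCII digits: PySem.Int.ofChars? is exact and
-- returns some there; the .getD 0 default is never taken on reachable calls.
def pvIntOfA (num : List Char) : Int := (PySem.Int.ofChars? num).getD 0

-- parse_len_op_cigar, specialised to assume_final_equals=True (the only way A calls it);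
-- none = the ValueError A raises on an op char with no preceding digits.
def pvParseA : List Char → List Char → List (Char × Int) → Option (List (Char × Int))
  | [], num, out =>
      if num.isEmpty then some out
      else some (out ++ [('=', pvIntOfA num)])
  | ch :: rest, num, out =>
      if PySem.Chars.isdigit ch then pvParseA rest (num ++ [ch]) out
      else if num.isEmpty then none
      else pvParseA rest [] (out ++ [(ch, pvIntOfA num)])

def pvStepA (st : Int × Int × Int × Int × Int × Int × Int) (p : Char × Int) :
    Int × Int × Int × Int × Int × Int × Int :=
  let (q, t, ne, nx, nm, nI, nD) := st
  let (op, n) := p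
  if op = '=' ∨ op = 'X' ∨ op = 'M' then
    if op = '=' then (q + n, t + n, ne + n, nx, nm, nI, nD)
    else if op = 'X' then (q + n, t + n, ne, nx + n, nm, nI, nD)
    else (q + n, t + n, ne, nx, nm + n, nI, nD)
  else if op = 'I' then (q + n, t, ne, nx, nm, nI + n, nD)
  else if op = 'D' then (q, t + n, ne, nx, nm, nI, nD + n)
  else (q, t, ne, nx, nm, nI, nD)

def cigar_counts_and_ends (cigar : String) (qstart : Int) (tstart : Int) :
    Int × Int × Int × Int × Int × Int × Int :=
  match pvParseA cigar.toList [] [] with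
  | none => (0, 0, 0, 0, 0, 0, 0)   -- Python raises ValueError here; outside Pre_
  | some ops =>
      let (q, t, ne, nx, nm, nI, nD) := ops.foldl pvStepA (qstart, tstart, 0, 0, 0, 0, 0)
      (q, t, ne, ne + nx + nm + nI + nD, nI, nD, nx + nI + nD)

-- ===== PORT B =====
def pvIntOfB (num : List Char) : Int := (PySem.Int.ofChars? num).getD 0

-- the inner `while j < L and cigar[j].isdigit(): j += 1` plus the slice cigar[i:j]:
-- splits off the maximal leading digit run
def pvSpanDigits : List Char → List Char × List Char
  | [] => ([], [])
  | c :: cs =>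
      if PySem.Chars.isdigit c then
        let (d, r) := pvSpanDigits cs
        (c :: d, r)
      else ([], c :: cs)

theorem pvSpanDigits_snd_length_le (cs : List Char) : (pvSpanDigits cs).2.length ≤ cs.length := by
  induction cs with
  | nil => simp [pvSpanDigits]
  | cons c cs ih =>
      simp only [pvSpanDigits]
      split
      · simpa using Nat.le_succ_of_le ih
      · simp

-- the body of `if op in cnt:`
def pvStepB (st : Int × Int × PySem.Dict Char Int) (op : Char) (n : Int) :
    Int × Int × PySem.Dict Char Int :=
  let (q, t, cnt) := st
  if cnt.contains op then
    ((if op ≠ 'D' then q + n else q), (if op ≠ 'I' then t + n else t),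
      cnt.insert op (cnt.getD op 0 + n))   -- cnt[op] += n : overwrite keeps position
  else (q, t, cnt)

-- the outer while loop; none = B's ValueError (digit run empty at position i)
def pvLoopB : List Char → Int × Int × PySem.Dict Char Int →
    Option (Int × Int × PySem.Dict Char Int)
  | [], st => some st
  | c :: cs, st =>
      if PySem.Chars.isdigit c then
        let dr := pvSpanDigits cs
        let n := pvIntOfB (c :: dr.1)
        let op := dr.2.headD '='
        pvLoopB dr.2.tail (pvStepB st op n)
      else none
termination_by cs => cs.length
decreasing_by
  have h := pvSpanDigits_snd_length_le cs
  simp only [List.length_tail, List.length_cons]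
  omega

def pvCnt0 : PySem.Dict Char Int :=
  PySem.Dict.ofList [('=', 0), ('X', 0), ('M', 0), ('I', 0), ('D', 0)]

def cigar_counts_and_ends_alt (cigar : String) (qstart : Int) (tstart : Int) :
    Int × Int × Int × Int × Int × Int × Int :=
  match pvLoopB cigar.toList (qstart, tstart, pvCnt0) with
  | none => (0, 0, 0, 0, 0, 0, 0)   -- Python raises ValueError here; outside Pre_
  | some (q, t, cnt) =>
      let nmatch := cnt.getD '=' 0
      let alnlen := nmatch + cnt.getD 'X' 0 + cnt.getD 'M' 0 + cnt.getD 'I' 0 + cnt.getD 'D' 0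
      let NM := cnt.getD 'X' 0 + cnt.getD 'I' 0 + cnt.getD 'D' 0
      (q, t, nmatch, alnlen, cnt.getD 'I' 0, cnt.getD 'D' 0, NM)

-- ===== PRECONDITION & SPEC =====
-- Pre_ excludes exactly the malformed CIGARs (an op character not immediately preceded by a
-- digit), on which the Python A raises ValueError (and B raises the same ValueError).
def Pre_cigar_counts_and_ends (cigar : String) (qstart : Int) (tstart : Int) : Prop :=
  (PySem.Chars.isdigit (cigar.toList.headD '0') &&
    (cigar.toList.zip cigar.toList.tail).all
      (fun p => PySem.Chars.isdigit p.1 || PySem.Chars.isdigit p.2)) = true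

instance (cigar : String) (qstart : Int) (tstart : Int) :
    Decidable (Pre_cigar_counts_and_ends cigar qstart tstart) := by
  unfold Pre_cigar_counts_and_ends; infer_instance

def pvWitness_cigar_counts_and_ends : String × Int × Int := ("10=2X3I4D5", 7, -3)

def Spec_cigar_counts_and_ends (cigar : String) (qstart : Int) (tstart : Int)
    (out : Int × Int × Int × Int × Int × Int × Int) : Prop :=
  out = cigar_counts_and_ends_alt cigar qstart tstart
instance (cigar : String) (qstart : Int) (tstart : Int) (out : Int × Int × Int × Int × Int × Int × Int) : Decidable (Spec_cigar_counts_and_ends cigar qstart tstart out) := by unfold Spec_cigar_counts_and_ends; infer_instance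

-- ===== CLAIM (what is proved, stated in full; the proofs are below) =====
def Claim_equal_cigar_counts_and_ends : Prop := ∀ (cigar : String) (qstart : Int) (tstart : Int), Dom_cigar_counts_and_ends cigar qstart tstart → Pre_cigar_counts_and_ends cigar qstart tstart → Spec_cigar_counts_and_ends cigar qstart tstart (cigar_counts_and_ends cigar qstart tstart)

-- ===== LEMMAS AND PROOFS =====

-- B's state corresponding to A's state tuple: the counter dict holds the five counters
def pvDict5 (ne nx nm nI nD : Int) : PySem.Dict Char Int :=
  PySem.Dict.mk [('=', ne), ('X', nx), ('M', nm), ('I', nI), ('D', nD)]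

def pvConv (st : Int × Int × Int × Int × Int × Int × Int) : Int × Int × PySem.Dict Char Int :=
  (st.1, st.2.1, pvDict5 st.2.2.1 st.2.2.2.1 st.2.2.2.2.1 st.2.2.2.2.2.1 st.2.2.2.2.2.2)

theorem pvStep_corr (st : Int × Int × Int × Int × Int × Int × Int) (op : Char) (n : Int) :
    pvStepB (pvConv st) op n = pvConv (pvStepA st (op, n)) := by
  obtain ⟨q, t, ne, nx, nm, nI, nD⟩ := st
  by_cases h1 : op = '='
  · subst h1
    simp [pvStepB, pvStepA, pvConv, pvDict5, PySem.Dict.contains_mk, PySem.Dict.ext_iff,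
      PySem.Dict.items_insert, PySem.Dict.getD, PySem.Dict.get?_mk_cons]
  · by_cases h2 : op = 'X'
    · subst h2
      simp [pvStepB, pvStepA, pvConv, pvDict5, PySem.Dict.contains_mk, PySem.Dict.ext_iff,
        PySem.Dict.items_insert, PySem.Dict.getD, PySem.Dict.get?_mk_cons, h1]
    · by_cases h3 : op = 'M'
      · subst h3
        simp [pvStepB, pvStepA, pvConv, pvDict5, PySem.Dict.contains_mk, PySem.Dict.ext_iff,
          PySem.Dict.items_insert, PySem.Dict.getD, PySem.Dict.get?_mk_cons, h1, h2]
      · by_cases h4 : op = 'I'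
        · subst h4
          simp [pvStepB, pvStepA, pvConv, pvDict5, PySem.Dict.contains_mk, PySem.Dict.ext_iff,
            PySem.Dict.items_insert, PySem.Dict.getD, PySem.Dict.get?_mk_cons, h1, h2, h3]
        · by_cases h5 : op = 'D'
          · subst h5
            simp [pvStepB, pvStepA, pvConv, pvDict5, PySem.Dict.contains_mk, PySem.Dict.ext_iff,
              PySem.Dict.items_insert, PySem.Dict.getD, PySem.Dict.get?_mk_cons, h1, h2, h3, h4]
          · simp [pvStepB, pvStepA, pvConv, pvDict5, PySem.Dict.contains_mk, h1, h2, h3, h4, h5,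
              Ne.symm h1, Ne.symm h2, Ne.symm h3, Ne.symm h4, Ne.symm h5]

theorem pvSpanDigits_all (num cs : List Char)
    (h : ∀ c ∈ num, PySem.Chars.isdigit c = true) :
    pvSpanDigits (num ++ cs) = (num ++ (pvSpanDigits cs).1, (pvSpanDigits cs).2) := by
  induction num with
  | nil => simp
  | cons d ds ih =>
      have hd : PySem.Chars.isdigit d = true := h d (by simp)
      simp only [List.cons_append, pvSpanDigits, hd, if_pos]
      rw [ih (fun c hc => h c (by simp [hc]))]

theorem pvParseA_acc (cs num : List Char) (out : List (Char × Int)) :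
    pvParseA cs num out = (pvParseA cs num []).map (out ++ ·) := by
  induction cs generalizing num out with
  | nil =>
      simp only [pvParseA]
      split <;> simp
  | cons ch rest ih =>
      simp only [pvParseA]
      split
      · exact ih _ _
      · split
        · simp
        · rw [ih _ (out ++ _), ih _ ([] ++ _)]
          cases pvParseA rest [] [] <;> simp

theorem pvMain (cs : List Char) (num : List Char)
    (hnum : ∀ c ∈ num, PySem.Chars.isdigit c = true)
    (st : Int × Int × Int × Int × Int × Int × Int) :
    pvLoopB (num ++ cs) (pvConv st) =
      (pvParseA cs num []).map (fun ops => pvConv (ops.foldl pvStepA st)) := by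
  induction cs generalizing num st with
  | nil =>
      cases num with
      | nil => simp [pvLoopB, pvParseA]
      | cons d ds =>
          have hd : PySem.Chars.isdigit d = true := hnum d (by simp)
          have hds : ∀ c ∈ ds, PySem.Chars.isdigit c = true := fun c hc => hnum c (by simp [hc])
          simp only [List.append_nil, pvLoopB, hd, if_pos]
          have hspan : pvSpanDigits ds = (ds, []) := by
            have := pvSpanDigits_all ds [] hds
            simpa [pvSpanDigits] using this
          rw [hspan]
          simp [pvParseA, pvLoopB, pvStep_corr, pvIntOfA, pvIntOfB]
  | cons ch rest ih =>
      by_cases hch : PySem.Chars.isdigit ch = true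
      · have : num ++ ch :: rest = (num ++ [ch]) ++ rest := by simp
        rw [this, ih (num ++ [ch]) (by intro c hc; rcases List.mem_append.1 hc with h | h
                                       · exact hnum c h
                                       · simp at h; subst h; exact hch) st]
        simp [pvParseA, hch]
      · cases num with
        | nil =>
            simp [pvLoopB, pvParseA, hch]
        | cons d ds =>
            have hd : PySem.Chars.isdigit d = true := hnum d (by simp)
            have hds : ∀ c ∈ ds, PySem.Chars.isdigit c = true := fun c hc => hnum c (by simp [hc])
            simp only [List.cons_append, pvLoopB, hd, if_pos]
            rw [pvSpanDigits_all ds (ch :: rest) hds]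
            have hspan2 : pvSpanDigits (ch :: rest) = ([], ch :: rest) := by
              simp [pvSpanDigits, hch]
            rw [hspan2]
            simp only [List.append_nil, List.headD_cons, List.tail_cons]
            rw [pvStep_corr]
            have hih := ih [] (by simp) (pvStepA st (ch, pvIntOfB (d :: ds)))
            simp only [List.nil_append] at hih
            rw [hih]
            simp only [pvParseA, hch, Bool.false_eq_true, if_false]
            simp only [List.isEmpty_cons, Bool.false_eq_true, if_false]
            simp only [List.nil_append]
            rw [pvParseA_acc rest [] [(ch, pvIntOfA (d :: ds))]]
            cases pvParseA rest [] [] <;> simp [pvIntOfA, pvIntOfB]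

-- ===== VERDICT (by name: the statement is the Claim_ definition above) =====
theorem cigar_counts_and_ends_spec : Claim_equal_cigar_counts_and_ends := by
  intro cigar qstart tstart _ _
  unfold Spec_cigar_counts_and_ends cigar_counts_and_ends cigar_counts_and_ends_alt
  have hd0 : pvCnt0 = pvDict5 0 0 0 0 0 := by decide
  have h0 : (qstart, tstart, pvCnt0) = pvConv (qstart, tstart, 0, 0, 0, 0, 0) := by
    rw [hd0]; rfl
  have hm := pvMain cigar.toList [] (by simp) (qstart, tstart, 0, 0, 0, 0, 0)
  simp only [List.nil_append] at hm
  rw [h0, hm]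
  cases hp : pvParseA cigar.toList [] [] with
  | none => simp
  | some ops =>
      simp only [Option.map_some]
      obtain ⟨q, t, ne, nx, nm, nI, nD⟩ := ops.foldl pvStepA (qstart, tstart, 0, 0, 0, 0, 0)
      simp [pvConv, pvDict5, PySem.Dict.getD, PySem.Dict.get?_mk_cons]
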